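-- pv_equiv track=rewrite | github.com/heroking777/LibertyCall | corp_collector/scripts/remove_domain_duplicates.py | get_email_priority
-- ===== SOURCE A (Python) =====
-- def get_email_priority(email: str) -> int:
--     """
--     メールアドレスの優先順位を返す
--     数値が小さいほど優先度が高い
--
--     Args:
--         email: メールアドレス
--
--     Returns:
--         優先順位（0が最高）
--     """
--     email_lower = email.lower()
--
--     # 優先度の高いメールアドレス
--     priority_emails = [
--         'info@',
--         'contact@',
--         'support@',
--         'sales@',
--         'inquiry@',
--         'inquiries@',
--         'mail@',
--         'office@',
--         'general@',
--     ]
--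
--     for i, priority in enumerate(priority_emails):
--         if email_lower.startswith(priority):
--             return i
--
--     # その他は低優先度
--     return 999
-- ===== SOURCE B (Python) =====
-- _WORDS = [
--     'info@', 'contact@', 'support@', 'sales@', 'inquiry@',
--     'inquiries@', 'mail@', 'office@', 'general@',
-- ]
--
-- # Arena-encoded trie over the priority prefixes: node 0 is the root;
-- # _CHILD[n] maps a character to the child node index, _RANK[n] is the
-- # priority at a terminal node (None elsewhere).
-- _CHILD = [{}]
-- _RANK = [None]
-- for _rank, _word in enumerate(_WORDS):
--     _node = 0
--     for _ch in _word:
--         _nxt = _CHILD[_node].get(_ch)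
--         if _nxt is None:
--             _nxt = len(_CHILD)
--             _CHILD[_node][_ch] = _nxt
--             _CHILD.append({})
--             _RANK.append(None)
--         _node = _nxt
--     _RANK[_node] = _rank
--
--
-- def get_email_priority(email: str) -> int:
--     node = 0
--     for ch in email.lower():
--         r = _RANK[node]
--         if r is not None:
--             return r
--         nxt = _CHILD[node].get(ch)
--         if nxt is None:
--             return 999
--         node = nxt
--     r = _RANK[node]
--     return r if r is not None else 999
-- ===== Notes on version B (the rewrite author's own statement) =====
-- stated objective: alternative
-- what changed: Replaces the per-prefix startswith scan by an arena-encoded trie (parallel child-table and rank lists) built once from the prefix list and then walked character by character, so each input character is examined once against a branching table instead of once per candidate prefix.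
import Mathlib
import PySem

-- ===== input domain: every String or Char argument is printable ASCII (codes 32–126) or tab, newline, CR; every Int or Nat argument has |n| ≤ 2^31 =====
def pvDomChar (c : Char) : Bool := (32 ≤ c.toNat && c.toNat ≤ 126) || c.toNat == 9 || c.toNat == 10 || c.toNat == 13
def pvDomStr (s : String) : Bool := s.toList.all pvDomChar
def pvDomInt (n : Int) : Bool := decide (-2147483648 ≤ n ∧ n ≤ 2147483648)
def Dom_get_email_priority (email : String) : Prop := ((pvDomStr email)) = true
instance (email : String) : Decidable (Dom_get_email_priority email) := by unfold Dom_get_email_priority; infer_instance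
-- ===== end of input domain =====

-- B replaces A's per-prefix startswith scan by a trie (arena-encoded: child tables
-- and terminal ranks in parallel lists) built once from the prefix list and walked
-- character by character; alternative decomposition, no speed claim.

-- ===== PORT A =====
-- the literal prefix list of A
def pvPrefixes : List (List Char) :=
  ["info@".toList, "contact@".toList, "support@".toList, "sales@".toList,
   "inquiry@".toList, "inquiries@".toList, "mail@".toList, "office@".toList,
   "general@".toList]

-- the 'for i, priority in enumerate(...): if startswith: return i' loop
def pvLoop (e : List Char) : List (List Char) → Int → Int
  | [], _ => 999
  | p :: rest, i => if PySem.Chars.startswith e p then i else pvLoop e rest (i + 1)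

def get_email_priority (email : String) : Int :=
  pvLoop (PySem.Chars.lower email.toList) pvPrefixes 0

-- ===== PORT B =====
-- the module-level _WORDS list of Source B
def pvWords : List (List Char) :=
  ["info@".toList, "contact@".toList, "support@".toList, "sales@".toList,
   "inquiry@".toList, "inquiries@".toList, "mail@".toList, "office@".toList,
   "general@".toList]

-- Source B's inner build loop body ('for _ch in _word: …'); arena indices are always in
-- range during the build and the walk, so List.getD/List.set are exact for _CHILD[_node]
def pvAddChar (st : (List (PySem.Dict Char Nat) × List (Option Int)) × Nat) (ch : Char) :
    (List (PySem.Dict Char Nat) × List (Option Int)) × Nat :=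
  let child := st.1.1
  let rank := st.1.2
  let node := st.2
  match (child.getD node PySem.Dict.empty).get? ch with
  | some nxt => ((child, rank), nxt)
  | none =>
      let nxt := child.length
      ((child.set node ((child.getD node PySem.Dict.empty).insert ch nxt) ++ [PySem.Dict.empty],
        rank ++ [none]), nxt)

-- Source B's outer build loop body ('for _rank, _word in enumerate(_WORDS): …')
def pvAddWord (st : List (PySem.Dict Char Nat) × List (Option Int)) (p : Int × List Char) :
    List (PySem.Dict Char Nat) × List (Option Int) :=
  let res := p.2.foldl pvAddChar (st, 0)
  (res.1.1, res.1.2.set res.2 (some p.1))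

-- the module-level trie (_CHILD, _RANK) of Source B
def pvTrieBuild : List (PySem.Dict Char Nat) × List (Option Int) :=
  (PySem.List.enumerate pvWords 0).foldl pvAddWord ([PySem.Dict.empty], [none])

def pvChild : List (PySem.Dict Char Nat) := pvTrieBuild.1

def pvRank : List (Option Int) := pvTrieBuild.2

-- the walk loop of get_email_priority in Source B, over the trie tables
def pvWalk (child : List (PySem.Dict Char Nat)) (rank : List (Option Int)) :
    List Char → Nat → Int
  | [], node =>
      match rank.getD node none with
      | some r => r
      | none => 999
  | ch :: t, node =>
      match rank.getD node none with
      | some r => r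
      | none =>
          match (child.getD node PySem.Dict.empty).get? ch with
          | some nxt => pvWalk child rank t nxt
          | none => 999

def get_email_priority_alt (email : String) : Int :=
  pvWalk pvChild pvRank (PySem.Chars.lower email.toList) 0

-- ===== PRECONDITION & SPEC =====
def Spec_get_email_priority (email : String) (out : Int) : Prop := out = get_email_priority_alt email
instance (email : String) (out : Int) : Decidable (Spec_get_email_priority email out) := by unfold Spec_get_email_priority; infer_instance

-- ===== CLAIM (what is proved, stated in full; the proofs are below) =====
def Claim_equal_get_email_priority : Prop := ∀ (email : String), Dom_get_email_priority email → Spec_get_email_priority email (get_email_priority email)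

-- ===== LEMMAS AND PROOFS =====

set_option maxRecDepth 40000

-- two startswith tests with incomparable needles cannot both succeed
lemma pv_mutex (l p q : List Char) (hp : PySem.Chars.startswith l p = true)
    (h1 : ¬ p <+: q) (h2 : ¬ q <+: p) : PySem.Chars.startswith l q = false := by
  cases h : PySem.Chars.startswith l q with
  | false => rfl
  | true =>
    have hpl := (PySem.Chars.startswith_iff l p).mp hp
    have hql := (PySem.Chars.startswith_iff l q).mp h
    rcases List.prefix_or_prefix_of_prefix hpl hql with hc | hc
    · exact absurd hc h1
    · exact absurd hc h2

-- the concrete value of the built trie, proved once by evaluation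
def pvCT : List (PySem.Dict Char Nat) := [PySem.Dict.mk [('i', 1), ('c', 6), ('s', 14), ('m', 37), ('o', 42), ('g', 49)], PySem.Dict.mk [('n', 2)], PySem.Dict.mk [('f', 3), ('q', 27)], PySem.Dict.mk [('o', 4)], PySem.Dict.mk [('@', 5)], PySem.Dict.mk [], PySem.Dict.mk [('o', 7)], PySem.Dict.mk [('n', 8)], PySem.Dict.mk [('t', 9)], PySem.Dict.mk [('a', 10)], PySem.Dict.mk [('c', 11)], PySem.Dict.mk [('t', 12)], PySem.Dict.mk [('@', 13)], PySem.Dict.mk [], PySem.Dict.mk [('u', 15), ('a', 22)], PySem.Dict.mk [('p', 16)], PySem.Dict.mk [('p', 17)], PySem.Dict.mk [('o', 18)], PySem.Dict.mk [('r', 19)], PySem.Dict.mk [('t', 20)], PySem.Dict.mk [('@', 21)], PySem.Dict.mk [], PySem.Dict.mk [('l', 23)], PySem.Dict.mk [('e', 24)], PySem.Dict.mk [('s', 25)], PySem.Dict.mk [('@', 26)], PySem.Dict.mk [], PySem.Dict.mk [('u', 28)], PySem.Dict.mk [('i', 29)], PySem.Dict.mk [('r', 30)], PySem.Dict.mk [('y',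 31), ('i', 33)], PySem.Dict.mk [('@', 32)], PySem.Dict.mk [], PySem.Dict.mk [('e', 34)], PySem.Dict.mk [('s', 35)], PySem.Dict.mk [('@', 36)], PySem.Dict.mk [], PySem.Dict.mk [('a', 38)], PySem.Dict.mk [('i', 39)], PySem.Dict.mk [('l', 40)], PySem.Dict.mk [('@', 41)], PySem.Dict.mk [], PySem.Dict.mk [('f', 43)], PySem.Dict.mk [('f', 44)], PySem.Dict.mk [('i', 45)], PySem.Dict.mk [('c', 46)], PySem.Dict.mk [('e', 47)], PySem.Dict.mk [('@', 48)], PySem.Dict.mk [], PySem.Dict.mk [('e', 50)], PySem.Dict.mk [('n', 51)], PySem.Dict.mk [('e', 52)], PySem.Dict.mk [('r', 53)], PySem.Dict.mk [('a', 54)], PySem.Dict.mk [('l', 55)], PySem.Dict.mk [('@', 56)], PySem.Dict.mk []]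

def pvRT : List (Option Int) := [none, none, none, none, none, some 0, none, none, none, none, none, none, none, some 1, none, none, none, none, none, none, none, some 2, none, none, none, none, some 3, none, none, none, none, none, some 4, none, none, none, some 5, none, none, none, none, some 6, none, none, none, none, none, none, some 7, none, none, none, none, none, none, none, some 8]

lemma pvChild_eq : pvChild = pvCT := by decide

lemma pvRank_eq : pvRank = pvRT := by decide

lemma pv_get_nil (c : Char) : (PySem.Dict.mk ([] : List (Char × Nat))).get? c = none := by rfl

lemma pvR_0 : pvRT[0]? = some none := by rfl

lemma pvD_0 : pvCT[0]? = some (PySem.Dict.mk [('i', 1), ('c', 6), ('s', 14), ('m', 37), ('o', 42), ('g', 49)]) := by rfl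

lemma pvR_1 : pvRT[1]? = some none := by rfl

lemma pvD_1 : pvCT[1]? = some (PySem.Dict.mk [('n', 2)]) := by rfl

lemma pvR_2 : pvRT[2]? = some none := by rfl

lemma pvD_2 : pvCT[2]? = some (PySem.Dict.mk [('f', 3), ('q', 27)]) := by rfl

lemma pvR_3 : pvRT[3]? = some none := by rfl

lemma pvD_3 : pvCT[3]? = some (PySem.Dict.mk [('o', 4)]) := by rfl

lemma pvR_4 : pvRT[4]? = some none := by rfl

lemma pvD_4 : pvCT[4]? = some (PySem.Dict.mk [('@', 5)]) := by rfl

lemma pvR_5 : pvRT[5]? = some (some (0 : Int)) := by rfl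

lemma pvR_6 : pvRT[6]? = some none := by rfl

lemma pvD_6 : pvCT[6]? = some (PySem.Dict.mk [('o', 7)]) := by rfl

lemma pvR_7 : pvRT[7]? = some none := by rfl

lemma pvD_7 : pvCT[7]? = some (PySem.Dict.mk [('n', 8)]) := by rfl

lemma pvR_8 : pvRT[8]? = some none := by rfl

lemma pvD_8 : pvCT[8]? = some (PySem.Dict.mk [('t', 9)]) := by rfl

lemma pvR_9 : pvRT[9]? = some none := by rfl

lemma pvD_9 : pvCT[9]? = some (PySem.Dict.mk [('a', 10)]) := by rfl

lemma pvR_10 : pvRT[10]? = some none := by rfl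

lemma pvD_10 : pvCT[10]? = some (PySem.Dict.mk [('c', 11)]) := by rfl

lemma pvR_11 : pvRT[11]? = some none := by rfl

lemma pvD_11 : pvCT[11]? = some (PySem.Dict.mk [('t', 12)]) := by rfl

lemma pvR_12 : pvRT[12]? = some none := by rfl

lemma pvD_12 : pvCT[12]? = some (PySem.Dict.mk [('@', 13)]) := by rfl

lemma pvR_13 : pvRT[13]? = some (some (1 : Int)) := by rfl

lemma pvR_14 : pvRT[14]? = some none := by rfl

lemma pvD_14 : pvCT[14]? = some (PySem.Dict.mk [('u', 15), ('a', 22)]) := by rfl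

lemma pvR_15 : pvRT[15]? = some none := by rfl

lemma pvD_15 : pvCT[15]? = some (PySem.Dict.mk [('p', 16)]) := by rfl

lemma pvR_16 : pvRT[16]? = some none := by rfl

lemma pvD_16 : pvCT[16]? = some (PySem.Dict.mk [('p', 17)]) := by rfl

lemma pvR_17 : pvRT[17]? = some none := by rfl

lemma pvD_17 : pvCT[17]? = some (PySem.Dict.mk [('o', 18)]) := by rfl

lemma pvR_18 : pvRT[18]? = some none := by rfl

lemma pvD_18 : pvCT[18]? = some (PySem.Dict.mk [('r', 19)]) := by rfl

lemma pvR_19 : pvRT[19]? = some none := by rfl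

lemma pvD_19 : pvCT[19]? = some (PySem.Dict.mk [('t', 20)]) := by rfl

lemma pvR_20 : pvRT[20]? = some none := by rfl

lemma pvD_20 : pvCT[20]? = some (PySem.Dict.mk [('@', 21)]) := by rfl

lemma pvR_21 : pvRT[21]? = some (some (2 : Int)) := by rfl

lemma pvR_22 : pvRT[22]? = some none := by rfl

lemma pvD_22 : pvCT[22]? = some (PySem.Dict.mk [('l', 23)]) := by rfl

lemma pvR_23 : pvRT[23]? = some none := by rfl

lemma pvD_23 : pvCT[23]? = some (PySem.Dict.mk [('e', 24)]) := by rfl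

lemma pvR_24 : pvRT[24]? = some none := by rfl

lemma pvD_24 : pvCT[24]? = some (PySem.Dict.mk [('s', 25)]) := by rfl

lemma pvR_25 : pvRT[25]? = some none := by rfl

lemma pvD_25 : pvCT[25]? = some (PySem.Dict.mk [('@', 26)]) := by rfl

lemma pvR_26 : pvRT[26]? = some (some (3 : Int)) := by rfl

lemma pvR_27 : pvRT[27]? = some none := by rfl

lemma pvD_27 : pvCT[27]? = some (PySem.Dict.mk [('u', 28)]) := by rfl

lemma pvR_28 : pvRT[28]? = some none := by rfl

lemma pvD_28 : pvCT[28]? = some (PySem.Dict.mk [('i', 29)]) := by rfl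

lemma pvR_29 : pvRT[29]? = some none := by rfl

lemma pvD_29 : pvCT[29]? = some (PySem.Dict.mk [('r', 30)]) := by rfl

lemma pvR_30 : pvRT[30]? = some none := by rfl

lemma pvD_30 : pvCT[30]? = some (PySem.Dict.mk [('y', 31), ('i', 33)]) := by rfl

lemma pvR_31 : pvRT[31]? = some none := by rfl

lemma pvD_31 : pvCT[31]? = some (PySem.Dict.mk [('@', 32)]) := by rfl

lemma pvR_32 : pvRT[32]? = some (some (4 : Int)) := by rfl

lemma pvR_33 : pvRT[33]? = some none := by rfl

lemma pvD_33 : pvCT[33]? = some (PySem.Dict.mk [('e', 34)]) := by rfl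

lemma pvR_34 : pvRT[34]? = some none := by rfl

lemma pvD_34 : pvCT[34]? = some (PySem.Dict.mk [('s', 35)]) := by rfl

lemma pvR_35 : pvRT[35]? = some none := by rfl

lemma pvD_35 : pvCT[35]? = some (PySem.Dict.mk [('@', 36)]) := by rfl

lemma pvR_36 : pvRT[36]? = some (some (5 : Int)) := by rfl

lemma pvR_37 : pvRT[37]? = some none := by rfl

lemma pvD_37 : pvCT[37]? = some (PySem.Dict.mk [('a', 38)]) := by rfl

lemma pvR_38 : pvRT[38]? = some none := by rfl

lemma pvD_38 : pvCT[38]? = some (PySem.Dict.mk [('i', 39)]) := by rfl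

lemma pvR_39 : pvRT[39]? = some none := by rfl

lemma pvD_39 : pvCT[39]? = some (PySem.Dict.mk [('l', 40)]) := by rfl

lemma pvR_40 : pvRT[40]? = some none := by rfl

lemma pvD_40 : pvCT[40]? = some (PySem.Dict.mk [('@', 41)]) := by rfl

lemma pvR_41 : pvRT[41]? = some (some (6 : Int)) := by rfl

lemma pvR_42 : pvRT[42]? = some none := by rfl

lemma pvD_42 : pvCT[42]? = some (PySem.Dict.mk [('f', 43)]) := by rfl

lemma pvR_43 : pvRT[43]? = some none := by rfl

lemma pvD_43 : pvCT[43]? = some (PySem.Dict.mk [('f', 44)]) := by rfl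

lemma pvR_44 : pvRT[44]? = some none := by rfl

lemma pvD_44 : pvCT[44]? = some (PySem.Dict.mk [('i', 45)]) := by rfl

lemma pvR_45 : pvRT[45]? = some none := by rfl

lemma pvD_45 : pvCT[45]? = some (PySem.Dict.mk [('c', 46)]) := by rfl

lemma pvR_46 : pvRT[46]? = some none := by rfl

lemma pvD_46 : pvCT[46]? = some (PySem.Dict.mk [('e', 47)]) := by rfl

lemma pvR_47 : pvRT[47]? = some none := by rfl

lemma pvD_47 : pvCT[47]? = some (PySem.Dict.mk [('@', 48)]) := by rfl

lemma pvR_48 : pvRT[48]? = some (some (7 : Int)) := by rfl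

lemma pvR_49 : pvRT[49]? = some none := by rfl

lemma pvD_49 : pvCT[49]? = some (PySem.Dict.mk [('e', 50)]) := by rfl

lemma pvR_50 : pvRT[50]? = some none := by rfl

lemma pvD_50 : pvCT[50]? = some (PySem.Dict.mk [('n', 51)]) := by rfl

lemma pvR_51 : pvRT[51]? = some none := by rfl

lemma pvD_51 : pvCT[51]? = some (PySem.Dict.mk [('e', 52)]) := by rfl

lemma pvR_52 : pvRT[52]? = some none := by rfl

lemma pvD_52 : pvCT[52]? = some (PySem.Dict.mk [('r', 53)]) := by rfl

lemma pvR_53 : pvRT[53]? = some none := by rfl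

lemma pvD_53 : pvCT[53]? = some (PySem.Dict.mk [('a', 54)]) := by rfl

lemma pvR_54 : pvRT[54]? = some none := by rfl

lemma pvD_54 : pvCT[54]? = some (PySem.Dict.mk [('l', 55)]) := by rfl

lemma pvR_55 : pvRT[55]? = some none := by rfl

lemma pvD_55 : pvCT[55]? = some (PySem.Dict.mk [('@', 56)]) := by rfl

lemma pvR_56 : pvRT[56]? = some (some (8 : Int)) := by rfl

lemma pvW_56 : ∀ l : List Char, pvWalk pvCT pvRT l 56 = 8 := by
  intro l; cases l <;> simp [pvWalk, pvR_56, List.getD]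

lemma pvW_55 : ∀ l : List Char, pvWalk pvCT pvRT l 55 = (if PySem.Chars.startswith l ['@'] then (8 : Int) else 999) := by
  intro l
  cases l with
  | nil => simp [pvWalk, pvR_55, PySem.Chars.startswith, List.isPrefixOf]
  | cons c t =>
      by_cases h0 : c = '@'
      · subst h0
        simp [pvWalk, pvR_55, pvD_55, PySem.Dict.get?_mk_cons, List.getD, pvW_56 t, PySem.Chars.startswith, List.isPrefixOf]
      simp [pvWalk, pvR_55, pvD_55, PySem.Dict.get?_mk_cons, pv_get_nil, List.getD, PySem.Chars.startswith, List.isPrefixOf, Ne.symm h0]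

lemma pvW_54 : ∀ l : List Char, pvWalk pvCT pvRT l 54 = (if PySem.Chars.startswith l ['l', '@'] then (8 : Int) else 999) := by
  intro l
  cases l with
  | nil => simp [pvWalk, pvR_54, PySem.Chars.startswith, List.isPrefixOf]
  | cons c t =>
      by_cases h0 : c = 'l'
      · subst h0
        simp [pvWalk, pvR_54, pvD_54, PySem.Dict.get?_mk_cons, List.getD, pvW_55 t, PySem.Chars.startswith, List.isPrefixOf]
      simp [pvWalk, pvR_54, pvD_54, PySem.Dict.get?_mk_cons, pv_get_nil, List.getD, PySem.Chars.startswith, List.isPrefixOf, Ne.symm h0]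

lemma pvW_53 : ∀ l : List Char, pvWalk pvCT pvRT l 53 = (if PySem.Chars.startswith l ['a', 'l', '@'] then (8 : Int) else 999) := by
  intro l
  cases l with
  | nil => simp [pvWalk, pvR_53, PySem.Chars.startswith, List.isPrefixOf]
  | cons c t =>
      by_cases h0 : c = 'a'
      · subst h0
        simp [pvWalk, pvR_53, pvD_53, PySem.Dict.get?_mk_cons, List.getD, pvW_54 t, PySem.Chars.startswith, List.isPrefixOf]
      simp [pvWalk, pvR_53, pvD_53, PySem.Dict.get?_mk_cons, pv_get_nil, List.getD, PySem.Chars.startswith, List.isPrefixOf, Ne.symm h0]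

lemma pvW_52 : ∀ l : List Char, pvWalk pvCT pvRT l 52 = (if PySem.Chars.startswith l ['r', 'a', 'l', '@'] then (8 : Int) else 999) := by
  intro l
  cases l with
  | nil => simp [pvWalk, pvR_52, PySem.Chars.startswith, List.isPrefixOf]
  | cons c t =>
      by_cases h0 : c = 'r'
      · subst h0
        simp [pvWalk, pvR_52, pvD_52, PySem.Dict.get?_mk_cons, List.getD, pvW_53 t, PySem.Chars.startswith, List.isPrefixOf]
      simp [pvWalk, pvR_52, pvD_52, PySem.Dict.get?_mk_cons, pv_get_nil, List.getD, PySem.Chars.startswith, List.isPrefixOf, Ne.symm h0]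

lemma pvW_51 : ∀ l : List Char, pvWalk pvCT pvRT l 51 = (if PySem.Chars.startswith l ['e', 'r', 'a', 'l', '@'] then (8 : Int) else 999) := by
  intro l
  cases l with
  | nil => simp [pvWalk, pvR_51, PySem.Chars.startswith, List.isPrefixOf]
  | cons c t =>
      by_cases h0 : c = 'e'
      · subst h0
        simp [pvWalk, pvR_51, pvD_51, PySem.Dict.get?_mk_cons, List.getD, pvW_52 t, PySem.Chars.startswith, List.isPrefixOf]
      simp [pvWalk, pvR_51, pvD_51, PySem.Dict.get?_mk_cons, pv_get_nil, List.getD, PySem.Chars.startswith, List.isPrefixOf, Ne.symm h0]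

lemma pvW_50 : ∀ l : List Char, pvWalk pvCT pvRT l 50 = (if PySem.Chars.startswith l ['n', 'e', 'r', 'a', 'l', '@'] then (8 : Int) else 999) := by
  intro l
  cases l with
  | nil => simp [pvWalk, pvR_50, PySem.Chars.startswith, List.isPrefixOf]
  | cons c t =>
      by_cases h0 : c = 'n'
      · subst h0
        simp [pvWalk, pvR_50, pvD_50, PySem.Dict.get?_mk_cons, List.getD, pvW_51 t, PySem.Chars.startswith, List.isPrefixOf]
      simp [pvWalk, pvR_50, pvD_50, PySem.Dict.get?_mk_cons, pv_get_nil, List.getD, PySem.Chars.startswith, List.isPrefixOf, Ne.symm h0]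

lemma pvW_49 : ∀ l : List Char, pvWalk pvCT pvRT l 49 = (if PySem.Chars.startswith l ['e', 'n', 'e', 'r', 'a', 'l', '@'] then (8 : Int) else 999) := by
  intro l
  cases l with
  | nil => simp [pvWalk, pvR_49, PySem.Chars.startswith, List.isPrefixOf]
  | cons c t =>
      by_cases h0 : c = 'e'
      · subst h0
        simp [pvWalk, pvR_49, pvD_49, PySem.Dict.get?_mk_cons, List.getD, pvW_50 t, PySem.Chars.startswith, List.isPrefixOf]
      simp [pvWalk, pvR_49, pvD_49, PySem.Dict.get?_mk_cons, pv_get_nil, List.getD, PySem.Chars.startswith, List.isPrefixOf, Ne.symm h0]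

lemma pvW_48 : ∀ l : List Char, pvWalk pvCT pvRT l 48 = 7 := by
  intro l; cases l <;> simp [pvWalk, pvR_48, List.getD]

lemma pvW_47 : ∀ l : List Char, pvWalk pvCT pvRT l 47 = (if PySem.Chars.startswith l ['@'] then (7 : Int) else 999) := by
  intro l
  cases l with
  | nil => simp [pvWalk, pvR_47, PySem.Chars.startswith, List.isPrefixOf]
  | cons c t =>
      by_cases h0 : c = '@'
      · subst h0
        simp [pvWalk, pvR_47, pvD_47, PySem.Dict.get?_mk_cons, List.getD, pvW_48 t, PySem.Chars.startswith, List.isPrefixOf]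
      simp [pvWalk, pvR_47, pvD_47, PySem.Dict.get?_mk_cons, pv_get_nil, List.getD, PySem.Chars.startswith, List.isPrefixOf, Ne.symm h0]

lemma pvW_46 : ∀ l : List Char, pvWalk pvCT pvRT l 46 = (if PySem.Chars.startswith l ['e', '@'] then (7 : Int) else 999) := by
  intro l
  cases l with
  | nil => simp [pvWalk, pvR_46, PySem.Chars.startswith, List.isPrefixOf]
  | cons c t =>
      by_cases h0 : c = 'e'
      · subst h0
        simp [pvWalk, pvR_46, pvD_46, PySem.Dict.get?_mk_cons, List.getD, pvW_47 t, PySem.Chars.startswith, List.isPrefixOf]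
      simp [pvWalk, pvR_46, pvD_46, PySem.Dict.get?_mk_cons, pv_get_nil, List.getD, PySem.Chars.startswith, List.isPrefixOf, Ne.symm h0]

lemma pvW_45 : ∀ l : List Char, pvWalk pvCT pvRT l 45 = (if PySem.Chars.startswith l ['c', 'e', '@'] then (7 : Int) else 999) := by
  intro l
  cases l with
  | nil => simp [pvWalk, pvR_45, PySem.Chars.startswith, List.isPrefixOf]
  | cons c t =>
      by_cases h0 : c = 'c'
      · subst h0
        simp [pvWalk, pvR_45, pvD_45, PySem.Dict.get?_mk_cons, List.getD, pvW_46 t, PySem.Chars.startswith, List.isPrefixOf]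
      simp [pvWalk, pvR_45, pvD_45, PySem.Dict.get?_mk_cons, pv_get_nil, List.getD, PySem.Chars.startswith, List.isPrefixOf, Ne.symm h0]

lemma pvW_44 : ∀ l : List Char, pvWalk pvCT pvRT l 44 = (if PySem.Chars.startswith l ['i', 'c', 'e', '@'] then (7 : Int) else 999) := by
  intro l
  cases l with
  | nil => simp [pvWalk, pvR_44, PySem.Chars.startswith, List.isPrefixOf]
  | cons c t =>
      by_cases h0 : c = 'i'
      · subst h0
        simp [pvWalk, pvR_44, pvD_44, PySem.Dict.get?_mk_cons, List.getD, pvW_45 t, PySem.Chars.startswith, List.isPrefixOf]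
      simp [pvWalk, pvR_44, pvD_44, PySem.Dict.get?_mk_cons, pv_get_nil, List.getD, PySem.Chars.startswith, List.isPrefixOf, Ne.symm h0]

lemma pvW_43 : ∀ l : List Char, pvWalk pvCT pvRT l 43 = (if PySem.Chars.startswith l ['f', 'i', 'c', 'e', '@'] then (7 : Int) else 999) := by
  intro l
  cases l with
  | nil => simp [pvWalk, pvR_43, PySem.Chars.startswith, List.isPrefixOf]
  | cons c t =>
      by_cases h0 : c = 'f'
      · subst h0
        simp [pvWalk, pvR_43, pvD_43, PySem.Dict.get?_mk_cons, List.getD, pvW_44 t, PySem.Chars.startswith, List.isPrefixOf]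
      simp [pvWalk, pvR_43, pvD_43, PySem.Dict.get?_mk_cons, pv_get_nil, List.getD, PySem.Chars.startswith, List.isPrefixOf, Ne.symm h0]

lemma pvW_42 : ∀ l : List Char, pvWalk pvCT pvRT l 42 = (if PySem.Chars.startswith l ['f', 'f', 'i', 'c', 'e', '@'] then (7 : Int) else 999) := by
  intro l
  cases l with
  | nil => simp [pvWalk, pvR_42, PySem.Chars.startswith, List.isPrefixOf]
  | cons c t =>
      by_cases h0 : c = 'f'
      · subst h0
        simp [pvWalk, pvR_42, pvD_42, PySem.Dict.get?_mk_cons, List.getD, pvW_43 t, PySem.Chars.startswith, List.isPrefixOf]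
      simp [pvWalk, pvR_42, pvD_42, PySem.Dict.get?_mk_cons, pv_get_nil, List.getD, PySem.Chars.startswith, List.isPrefixOf, Ne.symm h0]

lemma pvW_41 : ∀ l : List Char, pvWalk pvCT pvRT l 41 = 6 := by
  intro l; cases l <;> simp [pvWalk, pvR_41, List.getD]

lemma pvW_40 : ∀ l : List Char, pvWalk pvCT pvRT l 40 = (if PySem.Chars.startswith l ['@'] then (6 : Int) else 999) := by
  intro l
  cases l with
  | nil => simp [pvWalk, pvR_40, PySem.Chars.startswith, List.isPrefixOf]
  | cons c t =>
      by_cases h0 : c = '@'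
      · subst h0
        simp [pvWalk, pvR_40, pvD_40, PySem.Dict.get?_mk_cons, List.getD, pvW_41 t, PySem.Chars.startswith, List.isPrefixOf]
      simp [pvWalk, pvR_40, pvD_40, PySem.Dict.get?_mk_cons, pv_get_nil, List.getD, PySem.Chars.startswith, List.isPrefixOf, Ne.symm h0]

lemma pvW_39 : ∀ l : List Char, pvWalk pvCT pvRT l 39 = (if PySem.Chars.startswith l ['l', '@'] then (6 : Int) else 999) := by
  intro l
  cases l with
  | nil => simp [pvWalk, pvR_39, PySem.Chars.startswith, List.isPrefixOf]
  | cons c t =>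
      by_cases h0 : c = 'l'
      · subst h0
        simp [pvWalk, pvR_39, pvD_39, PySem.Dict.get?_mk_cons, List.getD, pvW_40 t, PySem.Chars.startswith, List.isPrefixOf]
      simp [pvWalk, pvR_39, pvD_39, PySem.Dict.get?_mk_cons, pv_get_nil, List.getD, PySem.Chars.startswith, List.isPrefixOf, Ne.symm h0]

lemma pvW_38 : ∀ l : List Char, pvWalk pvCT pvRT l 38 = (if PySem.Chars.startswith l ['i', 'l', '@'] then (6 : Int) else 999) := by
  intro l
  cases l with
  | nil => simp [pvWalk, pvR_38, PySem.Chars.startswith, List.isPrefixOf]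
  | cons c t =>
      by_cases h0 : c = 'i'
      · subst h0
        simp [pvWalk, pvR_38, pvD_38, PySem.Dict.get?_mk_cons, List.getD, pvW_39 t, PySem.Chars.startswith, List.isPrefixOf]
      simp [pvWalk, pvR_38, pvD_38, PySem.Dict.get?_mk_cons, pv_get_nil, List.getD, PySem.Chars.startswith, List.isPrefixOf, Ne.symm h0]

lemma pvW_37 : ∀ l : List Char, pvWalk pvCT pvRT l 37 = (if PySem.Chars.startswith l ['a', 'i', 'l', '@'] then (6 : Int) else 999) := by
  intro l
  cases l with
  | nil => simp [pvWalk, pvR_37, PySem.Chars.startswith, List.isPrefixOf]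
  | cons c t =>
      by_cases h0 : c = 'a'
      · subst h0
        simp [pvWalk, pvR_37, pvD_37, PySem.Dict.get?_mk_cons, List.getD, pvW_38 t, PySem.Chars.startswith, List.isPrefixOf]
      simp [pvWalk, pvR_37, pvD_37, PySem.Dict.get?_mk_cons, pv_get_nil, List.getD, PySem.Chars.startswith, List.isPrefixOf, Ne.symm h0]

lemma pvW_36 : ∀ l : List Char, pvWalk pvCT pvRT l 36 = 5 := by
  intro l; cases l <;> simp [pvWalk, pvR_36, List.getD]

lemma pvW_35 : ∀ l : List Char, pvWalk pvCT pvRT l 35 = (if PySem.Chars.startswith l ['@'] then (5 : Int) else 999) := by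
  intro l
  cases l with
  | nil => simp [pvWalk, pvR_35, PySem.Chars.startswith, List.isPrefixOf]
  | cons c t =>
      by_cases h0 : c = '@'
      · subst h0
        simp [pvWalk, pvR_35, pvD_35, PySem.Dict.get?_mk_cons, List.getD, pvW_36 t, PySem.Chars.startswith, List.isPrefixOf]
      simp [pvWalk, pvR_35, pvD_35, PySem.Dict.get?_mk_cons, pv_get_nil, List.getD, PySem.Chars.startswith, List.isPrefixOf, Ne.symm h0]

lemma pvW_34 : ∀ l : List Char, pvWalk pvCT pvRT l 34 = (if PySem.Chars.startswith l ['s', '@'] then (5 : Int) else 999) := by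
  intro l
  cases l with
  | nil => simp [pvWalk, pvR_34, PySem.Chars.startswith, List.isPrefixOf]
  | cons c t =>
      by_cases h0 : c = 's'
      · subst h0
        simp [pvWalk, pvR_34, pvD_34, PySem.Dict.get?_mk_cons, List.getD, pvW_35 t, PySem.Chars.startswith, List.isPrefixOf]
      simp [pvWalk, pvR_34, pvD_34, PySem.Dict.get?_mk_cons, pv_get_nil, List.getD, PySem.Chars.startswith, List.isPrefixOf, Ne.symm h0]

lemma pvW_33 : ∀ l : List Char, pvWalk pvCT pvRT l 33 = (if PySem.Chars.startswith l ['e', 's', '@'] then (5 : Int) else 999) := by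
  intro l
  cases l with
  | nil => simp [pvWalk, pvR_33, PySem.Chars.startswith, List.isPrefixOf]
  | cons c t =>
      by_cases h0 : c = 'e'
      · subst h0
        simp [pvWalk, pvR_33, pvD_33, PySem.Dict.get?_mk_cons, List.getD, pvW_34 t, PySem.Chars.startswith, List.isPrefixOf]
      simp [pvWalk, pvR_33, pvD_33, PySem.Dict.get?_mk_cons, pv_get_nil, List.getD, PySem.Chars.startswith, List.isPrefixOf, Ne.symm h0]

lemma pvW_32 : ∀ l : List Char, pvWalk pvCT pvRT l 32 = 4 := by
  intro l; cases l <;> simp [pvWalk, pvR_32, List.getD]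

lemma pvW_31 : ∀ l : List Char, pvWalk pvCT pvRT l 31 = (if PySem.Chars.startswith l ['@'] then (4 : Int) else 999) := by
  intro l
  cases l with
  | nil => simp [pvWalk, pvR_31, PySem.Chars.startswith, List.isPrefixOf]
  | cons c t =>
      by_cases h0 : c = '@'
      · subst h0
        simp [pvWalk, pvR_31, pvD_31, PySem.Dict.get?_mk_cons, List.getD, pvW_32 t, PySem.Chars.startswith, List.isPrefixOf]
      simp [pvWalk, pvR_31, pvD_31, PySem.Dict.get?_mk_cons, pv_get_nil, List.getD, PySem.Chars.startswith, List.isPrefixOf, Ne.symm h0]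

lemma pvW_30 : ∀ l : List Char, pvWalk pvCT pvRT l 30 = (if PySem.Chars.startswith l ['y', '@'] then (4 : Int) else (if PySem.Chars.startswith l ['i', 'e', 's', '@'] then (5 : Int) else 999)) := by
  intro l
  cases l with
  | nil => simp [pvWalk, pvR_30, PySem.Chars.startswith, List.isPrefixOf]
  | cons c t =>
      by_cases h0 : c = 'y'
      · subst h0
        simp [pvWalk, pvR_30, pvD_30, PySem.Dict.get?_mk_cons, List.getD, pvW_31 t, PySem.Chars.startswith, List.isPrefixOf]
      by_cases h1 : c = 'i'
      · subst h1
        simp [pvWalk, pvR_30, pvD_30, PySem.Dict.get?_mk_cons, List.getD, pvW_33 t, PySem.Chars.startswith, List.isPrefixOf]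
      simp [pvWalk, pvR_30, pvD_30, PySem.Dict.get?_mk_cons, pv_get_nil, List.getD, PySem.Chars.startswith, List.isPrefixOf, Ne.symm h0, Ne.symm h1]

lemma pvW_29 : ∀ l : List Char, pvWalk pvCT pvRT l 29 = (if PySem.Chars.startswith l ['r', 'y', '@'] then (4 : Int) else (if PySem.Chars.startswith l ['r', 'i', 'e', 's', '@'] then (5 : Int) else 999)) := by
  intro l
  cases l with
  | nil => simp [pvWalk, pvR_29, PySem.Chars.startswith, List.isPrefixOf]
  | cons c t =>
      by_cases h0 : c = 'r'
      · subst h0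
        simp [pvWalk, pvR_29, pvD_29, PySem.Dict.get?_mk_cons, List.getD, pvW_30 t, PySem.Chars.startswith, List.isPrefixOf]
      simp [pvWalk, pvR_29, pvD_29, PySem.Dict.get?_mk_cons, pv_get_nil, List.getD, PySem.Chars.startswith, List.isPrefixOf, Ne.symm h0]

lemma pvW_28 : ∀ l : List Char, pvWalk pvCT pvRT l 28 = (if PySem.Chars.startswith l ['i', 'r', 'y', '@'] then (4 : Int) else (if PySem.Chars.startswith l ['i', 'r', 'i', 'e', 's', '@'] then (5 : Int) else 999)) := by
  intro l
  cases l with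
  | nil => simp [pvWalk, pvR_28, PySem.Chars.startswith, List.isPrefixOf]
  | cons c t =>
      by_cases h0 : c = 'i'
      · subst h0
        simp [pvWalk, pvR_28, pvD_28, PySem.Dict.get?_mk_cons, List.getD, pvW_29 t, PySem.Chars.startswith, List.isPrefixOf]
      simp [pvWalk, pvR_28, pvD_28, PySem.Dict.get?_mk_cons, pv_get_nil, List.getD, PySem.Chars.startswith, List.isPrefixOf, Ne.symm h0]

lemma pvW_27 : ∀ l : List Char, pvWalk pvCT pvRT l 27 = (if PySem.Chars.startswith l ['u', 'i', 'r', 'y', '@'] then (4 : Int) else (if PySem.Chars.startswith l ['u', 'i', 'r', 'i', 'e', 's', '@'] then (5 : Int) else 999)) := by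
  intro l
  cases l with
  | nil => simp [pvWalk, pvR_27, PySem.Chars.startswith, List.isPrefixOf]
  | cons c t =>
      by_cases h0 : c = 'u'
      · subst h0
        simp [pvWalk, pvR_27, pvD_27, PySem.Dict.get?_mk_cons, List.getD, pvW_28 t, PySem.Chars.startswith, List.isPrefixOf]
      simp [pvWalk, pvR_27, pvD_27, PySem.Dict.get?_mk_cons, pv_get_nil, List.getD, PySem.Chars.startswith, List.isPrefixOf, Ne.symm h0]

lemma pvW_26 : ∀ l : List Char, pvWalk pvCT pvRT l 26 = 3 := by
  intro l; cases l <;> simp [pvWalk, pvR_26, List.getD]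

lemma pvW_25 : ∀ l : List Char, pvWalk pvCT pvRT l 25 = (if PySem.Chars.startswith l ['@'] then (3 : Int) else 999) := by
  intro l
  cases l with
  | nil => simp [pvWalk, pvR_25, PySem.Chars.startswith, List.isPrefixOf]
  | cons c t =>
      by_cases h0 : c = '@'
      · subst h0
        simp [pvWalk, pvR_25, pvD_25, PySem.Dict.get?_mk_cons, List.getD, pvW_26 t, PySem.Chars.startswith, List.isPrefixOf]
      simp [pvWalk, pvR_25, pvD_25, PySem.Dict.get?_mk_cons, pv_get_nil, List.getD, PySem.Chars.startswith, List.isPrefixOf, Ne.symm h0]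

lemma pvW_24 : ∀ l : List Char, pvWalk pvCT pvRT l 24 = (if PySem.Chars.startswith l ['s', '@'] then (3 : Int) else 999) := by
  intro l
  cases l with
  | nil => simp [pvWalk, pvR_24, PySem.Chars.startswith, List.isPrefixOf]
  | cons c t =>
      by_cases h0 : c = 's'
      · subst h0
        simp [pvWalk, pvR_24, pvD_24, PySem.Dict.get?_mk_cons, List.getD, pvW_25 t, PySem.Chars.startswith, List.isPrefixOf]
      simp [pvWalk, pvR_24, pvD_24, PySem.Dict.get?_mk_cons, pv_get_nil, List.getD, PySem.Chars.startswith, List.isPrefixOf, Ne.symm h0]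

lemma pvW_23 : ∀ l : List Char, pvWalk pvCT pvRT l 23 = (if PySem.Chars.startswith l ['e', 's', '@'] then (3 : Int) else 999) := by
  intro l
  cases l with
  | nil => simp [pvWalk, pvR_23, PySem.Chars.startswith, List.isPrefixOf]
  | cons c t =>
      by_cases h0 : c = 'e'
      · subst h0
        simp [pvWalk, pvR_23, pvD_23, PySem.Dict.get?_mk_cons, List.getD, pvW_24 t, PySem.Chars.startswith, List.isPrefixOf]
      simp [pvWalk, pvR_23, pvD_23, PySem.Dict.get?_mk_cons, pv_get_nil, List.getD, PySem.Chars.startswith, List.isPrefixOf, Ne.symm h0]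

lemma pvW_22 : ∀ l : List Char, pvWalk pvCT pvRT l 22 = (if PySem.Chars.startswith l ['l', 'e', 's', '@'] then (3 : Int) else 999) := by
  intro l
  cases l with
  | nil => simp [pvWalk, pvR_22, PySem.Chars.startswith, List.isPrefixOf]
  | cons c t =>
      by_cases h0 : c = 'l'
      · subst h0
        simp [pvWalk, pvR_22, pvD_22, PySem.Dict.get?_mk_cons, List.getD, pvW_23 t, PySem.Chars.startswith, List.isPrefixOf]
      simp [pvWalk, pvR_22, pvD_22, PySem.Dict.get?_mk_cons, pv_get_nil, List.getD, PySem.Chars.startswith, List.isPrefixOf, Ne.symm h0]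

lemma pvW_21 : ∀ l : List Char, pvWalk pvCT pvRT l 21 = 2 := by
  intro l; cases l <;> simp [pvWalk, pvR_21, List.getD]

lemma pvW_20 : ∀ l : List Char, pvWalk pvCT pvRT l 20 = (if PySem.Chars.startswith l ['@'] then (2 : Int) else 999) := by
  intro l
  cases l with
  | nil => simp [pvWalk, pvR_20, PySem.Chars.startswith, List.isPrefixOf]
  | cons c t =>
      by_cases h0 : c = '@'
      · subst h0
        simp [pvWalk, pvR_20, pvD_20, PySem.Dict.get?_mk_cons, List.getD, pvW_21 t, PySem.Chars.startswith, List.isPrefixOf]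
      simp [pvWalk, pvR_20, pvD_20, PySem.Dict.get?_mk_cons, pv_get_nil, List.getD, PySem.Chars.startswith, List.isPrefixOf, Ne.symm h0]

lemma pvW_19 : ∀ l : List Char, pvWalk pvCT pvRT l 19 = (if PySem.Chars.startswith l ['t', '@'] then (2 : Int) else 999) := by
  intro l
  cases l with
  | nil => simp [pvWalk, pvR_19, PySem.Chars.startswith, List.isPrefixOf]
  | cons c t =>
      by_cases h0 : c = 't'
      · subst h0
        simp [pvWalk, pvR_19, pvD_19, PySem.Dict.get?_mk_cons, List.getD, pvW_20 t, PySem.Chars.startswith, List.isPrefixOf]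
      simp [pvWalk, pvR_19, pvD_19, PySem.Dict.get?_mk_cons, pv_get_nil, List.getD, PySem.Chars.startswith, List.isPrefixOf, Ne.symm h0]

lemma pvW_18 : ∀ l : List Char, pvWalk pvCT pvRT l 18 = (if PySem.Chars.startswith l ['r', 't', '@'] then (2 : Int) else 999) := by
  intro l
  cases l with
  | nil => simp [pvWalk, pvR_18, PySem.Chars.startswith, List.isPrefixOf]
  | cons c t =>
      by_cases h0 : c = 'r'
      · subst h0
        simp [pvWalk, pvR_18, pvD_18, PySem.Dict.get?_mk_cons, List.getD, pvW_19 t, PySem.Chars.startswith, List.isPrefixOf]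
      simp [pvWalk, pvR_18, pvD_18, PySem.Dict.get?_mk_cons, pv_get_nil, List.getD, PySem.Chars.startswith, List.isPrefixOf, Ne.symm h0]

lemma pvW_17 : ∀ l : List Char, pvWalk pvCT pvRT l 17 = (if PySem.Chars.startswith l ['o', 'r', 't', '@'] then (2 : Int) else 999) := by
  intro l
  cases l with
  | nil => simp [pvWalk, pvR_17, PySem.Chars.startswith, List.isPrefixOf]
  | cons c t =>
      by_cases h0 : c = 'o'
      · subst h0
        simp [pvWalk, pvR_17, pvD_17, PySem.Dict.get?_mk_cons, List.getD, pvW_18 t, PySem.Chars.startswith, List.isPrefixOf]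
      simp [pvWalk, pvR_17, pvD_17, PySem.Dict.get?_mk_cons, pv_get_nil, List.getD, PySem.Chars.startswith, List.isPrefixOf, Ne.symm h0]

lemma pvW_16 : ∀ l : List Char, pvWalk pvCT pvRT l 16 = (if PySem.Chars.startswith l ['p', 'o', 'r', 't', '@'] then (2 : Int) else 999) := by
  intro l
  cases l with
  | nil => simp [pvWalk, pvR_16, PySem.Chars.startswith, List.isPrefixOf]
  | cons c t =>
      by_cases h0 : c = 'p'
      · subst h0
        simp [pvWalk, pvR_16, pvD_16, PySem.Dict.get?_mk_cons, List.getD, pvW_17 t, PySem.Chars.startswith, List.isPrefixOf]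
      simp [pvWalk, pvR_16, pvD_16, PySem.Dict.get?_mk_cons, pv_get_nil, List.getD, PySem.Chars.startswith, List.isPrefixOf, Ne.symm h0]

lemma pvW_15 : ∀ l : List Char, pvWalk pvCT pvRT l 15 = (if PySem.Chars.startswith l ['p', 'p', 'o', 'r', 't', '@'] then (2 : Int) else 999) := by
  intro l
  cases l with
  | nil => simp [pvWalk, pvR_15, PySem.Chars.startswith, List.isPrefixOf]
  | cons c t =>
      by_cases h0 : c = 'p'
      · subst h0
        simp [pvWalk, pvR_15, pvD_15, PySem.Dict.get?_mk_cons, List.getD, pvW_16 t, PySem.Chars.startswith, List.isPrefixOf]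
      simp [pvWalk, pvR_15, pvD_15, PySem.Dict.get?_mk_cons, pv_get_nil, List.getD, PySem.Chars.startswith, List.isPrefixOf, Ne.symm h0]

lemma pvW_14 : ∀ l : List Char, pvWalk pvCT pvRT l 14 = (if PySem.Chars.startswith l ['u', 'p', 'p', 'o', 'r', 't', '@'] then (2 : Int) else (if PySem.Chars.startswith l ['a', 'l', 'e', 's', '@'] then (3 : Int) else 999)) := by
  intro l
  cases l with
  | nil => simp [pvWalk, pvR_14, PySem.Chars.startswith, List.isPrefixOf]
  | cons c t =>
      by_cases h0 : c = 'u'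
      · subst h0
        simp [pvWalk, pvR_14, pvD_14, PySem.Dict.get?_mk_cons, List.getD, pvW_15 t, PySem.Chars.startswith, List.isPrefixOf]
      by_cases h1 : c = 'a'
      · subst h1
        simp [pvWalk, pvR_14, pvD_14, PySem.Dict.get?_mk_cons, List.getD, pvW_22 t, PySem.Chars.startswith, List.isPrefixOf]
      simp [pvWalk, pvR_14, pvD_14, PySem.Dict.get?_mk_cons, pv_get_nil, List.getD, PySem.Chars.startswith, List.isPrefixOf, Ne.symm h0, Ne.symm h1]

lemma pvW_13 : ∀ l : List Char, pvWalk pvCT pvRT l 13 = 1 := by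
  intro l; cases l <;> simp [pvWalk, pvR_13, List.getD]

lemma pvW_12 : ∀ l : List Char, pvWalk pvCT pvRT l 12 = (if PySem.Chars.startswith l ['@'] then (1 : Int) else 999) := by
  intro l
  cases l with
  | nil => simp [pvWalk, pvR_12, PySem.Chars.startswith, List.isPrefixOf]
  | cons c t =>
      by_cases h0 : c = '@'
      · subst h0
        simp [pvWalk, pvR_12, pvD_12, PySem.Dict.get?_mk_cons, List.getD, pvW_13 t, PySem.Chars.startswith, List.isPrefixOf]
      simp [pvWalk, pvR_12, pvD_12, PySem.Dict.get?_mk_cons, pv_get_nil, List.getD, PySem.Chars.startswith, List.isPrefixOf, Ne.symm h0]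

lemma pvW_11 : ∀ l : List Char, pvWalk pvCT pvRT l 11 = (if PySem.Chars.startswith l ['t', '@'] then (1 : Int) else 999) := by
  intro l
  cases l with
  | nil => simp [pvWalk, pvR_11, PySem.Chars.startswith, List.isPrefixOf]
  | cons c t =>
      by_cases h0 : c = 't'
      · subst h0
        simp [pvWalk, pvR_11, pvD_11, PySem.Dict.get?_mk_cons, List.getD, pvW_12 t, PySem.Chars.startswith, List.isPrefixOf]
      simp [pvWalk, pvR_11, pvD_11, PySem.Dict.get?_mk_cons, pv_get_nil, List.getD, PySem.Chars.startswith, List.isPrefixOf, Ne.symm h0]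

lemma pvW_10 : ∀ l : List Char, pvWalk pvCT pvRT l 10 = (if PySem.Chars.startswith l ['c', 't', '@'] then (1 : Int) else 999) := by
  intro l
  cases l with
  | nil => simp [pvWalk, pvR_10, PySem.Chars.startswith, List.isPrefixOf]
  | cons c t =>
      by_cases h0 : c = 'c'
      · subst h0
        simp [pvWalk, pvR_10, pvD_10, PySem.Dict.get?_mk_cons, List.getD, pvW_11 t, PySem.Chars.startswith, List.isPrefixOf]
      simp [pvWalk, pvR_10, pvD_10, PySem.Dict.get?_mk_cons, pv_get_nil, List.getD, PySem.Chars.startswith, List.isPrefixOf, Ne.symm h0]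

lemma pvW_9 : ∀ l : List Char, pvWalk pvCT pvRT l 9 = (if PySem.Chars.startswith l ['a', 'c', 't', '@'] then (1 : Int) else 999) := by
  intro l
  cases l with
  | nil => simp [pvWalk, pvR_9, PySem.Chars.startswith, List.isPrefixOf]
  | cons c t =>
      by_cases h0 : c = 'a'
      · subst h0
        simp [pvWalk, pvR_9, pvD_9, PySem.Dict.get?_mk_cons, List.getD, pvW_10 t, PySem.Chars.startswith, List.isPrefixOf]
      simp [pvWalk, pvR_9, pvD_9, PySem.Dict.get?_mk_cons, pv_get_nil, List.getD, PySem.Chars.startswith, List.isPrefixOf, Ne.symm h0]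

lemma pvW_8 : ∀ l : List Char, pvWalk pvCT pvRT l 8 = (if PySem.Chars.startswith l ['t', 'a', 'c', 't', '@'] then (1 : Int) else 999) := by
  intro l
  cases l with
  | nil => simp [pvWalk, pvR_8, PySem.Chars.startswith, List.isPrefixOf]
  | cons c t =>
      by_cases h0 : c = 't'
      · subst h0
        simp [pvWalk, pvR_8, pvD_8, PySem.Dict.get?_mk_cons, List.getD, pvW_9 t, PySem.Chars.startswith, List.isPrefixOf]
      simp [pvWalk, pvR_8, pvD_8, PySem.Dict.get?_mk_cons, pv_get_nil, List.getD, PySem.Chars.startswith, List.isPrefixOf, Ne.symm h0]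

lemma pvW_7 : ∀ l : List Char, pvWalk pvCT pvRT l 7 = (if PySem.Chars.startswith l ['n', 't', 'a', 'c', 't', '@'] then (1 : Int) else 999) := by
  intro l
  cases l with
  | nil => simp [pvWalk, pvR_7, PySem.Chars.startswith, List.isPrefixOf]
  | cons c t =>
      by_cases h0 : c = 'n'
      · subst h0
        simp [pvWalk, pvR_7, pvD_7, PySem.Dict.get?_mk_cons, List.getD, pvW_8 t, PySem.Chars.startswith, List.isPrefixOf]
      simp [pvWalk, pvR_7, pvD_7, PySem.Dict.get?_mk_cons, pv_get_nil, List.getD, PySem.Chars.startswith, List.isPrefixOf, Ne.symm h0]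

lemma pvW_6 : ∀ l : List Char, pvWalk pvCT pvRT l 6 = (if PySem.Chars.startswith l ['o', 'n', 't', 'a', 'c', 't', '@'] then (1 : Int) else 999) := by
  intro l
  cases l with
  | nil => simp [pvWalk, pvR_6, PySem.Chars.startswith, List.isPrefixOf]
  | cons c t =>
      by_cases h0 : c = 'o'
      · subst h0
        simp [pvWalk, pvR_6, pvD_6, PySem.Dict.get?_mk_cons, List.getD, pvW_7 t, PySem.Chars.startswith, List.isPrefixOf]
      simp [pvWalk, pvR_6, pvD_6, PySem.Dict.get?_mk_cons, pv_get_nil, List.getD, PySem.Chars.startswith, List.isPrefixOf, Ne.symm h0]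

lemma pvW_5 : ∀ l : List Char, pvWalk pvCT pvRT l 5 = 0 := by
  intro l; cases l <;> simp [pvWalk, pvR_5, List.getD]

lemma pvW_4 : ∀ l : List Char, pvWalk pvCT pvRT l 4 = (if PySem.Chars.startswith l ['@'] then (0 : Int) else 999) := by
  intro l
  cases l with
  | nil => simp [pvWalk, pvR_4, PySem.Chars.startswith, List.isPrefixOf]
  | cons c t =>
      by_cases h0 : c = '@'
      · subst h0
        simp [pvWalk, pvR_4, pvD_4, PySem.Dict.get?_mk_cons, List.getD, pvW_5 t, PySem.Chars.startswith, List.isPrefixOf]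
      simp [pvWalk, pvR_4, pvD_4, PySem.Dict.get?_mk_cons, pv_get_nil, List.getD, PySem.Chars.startswith, List.isPrefixOf, Ne.symm h0]

lemma pvW_3 : ∀ l : List Char, pvWalk pvCT pvRT l 3 = (if PySem.Chars.startswith l ['o', '@'] then (0 : Int) else 999) := by
  intro l
  cases l with
  | nil => simp [pvWalk, pvR_3, PySem.Chars.startswith, List.isPrefixOf]
  | cons c t =>
      by_cases h0 : c = 'o'
      · subst h0
        simp [pvWalk, pvR_3, pvD_3, PySem.Dict.get?_mk_cons, List.getD, pvW_4 t, PySem.Chars.startswith, List.isPrefixOf]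
      simp [pvWalk, pvR_3, pvD_3, PySem.Dict.get?_mk_cons, pv_get_nil, List.getD, PySem.Chars.startswith, List.isPrefixOf, Ne.symm h0]

lemma pvW_2 : ∀ l : List Char, pvWalk pvCT pvRT l 2 = (if PySem.Chars.startswith l ['f', 'o', '@'] then (0 : Int) else (if PySem.Chars.startswith l ['q', 'u', 'i', 'r', 'y', '@'] then (4 : Int) else (if PySem.Chars.startswith l ['q', 'u', 'i', 'r', 'i', 'e', 's', '@'] then (5 : Int) else 999))) := by
  intro l
  cases l with
  | nil => simp [pvWalk, pvR_2, PySem.Chars.startswith, List.isPrefixOf]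
  | cons c t =>
      by_cases h0 : c = 'f'
      · subst h0
        simp [pvWalk, pvR_2, pvD_2, PySem.Dict.get?_mk_cons, List.getD, pvW_3 t, PySem.Chars.startswith, List.isPrefixOf]
      by_cases h1 : c = 'q'
      · subst h1
        simp [pvWalk, pvR_2, pvD_2, PySem.Dict.get?_mk_cons, List.getD, pvW_27 t, PySem.Chars.startswith, List.isPrefixOf]
      simp [pvWalk, pvR_2, pvD_2, PySem.Dict.get?_mk_cons, pv_get_nil, List.getD, PySem.Chars.startswith, List.isPrefixOf, Ne.symm h0, Ne.symm h1]

lemma pvW_1 : ∀ l : List Char, pvWalk pvCT pvRT l 1 = (if PySem.Chars.startswith l ['n', 'f', 'o', '@'] then (0 : Int) else (if PySem.Chars.startswith l ['n', 'q', 'u', 'i', 'r', 'y', '@'] then (4 : Int) else (if PySem.Chars.startswith l ['n', 'q', 'u', 'i', 'r', 'i', 'e', 's', '@'] then (5 : Int) else 999))) := by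
  intro l
  cases l with
  | nil => simp [pvWalk, pvR_1, PySem.Chars.startswith, List.isPrefixOf]
  | cons c t =>
      by_cases h0 : c = 'n'
      · subst h0
        simp [pvWalk, pvR_1, pvD_1, PySem.Dict.get?_mk_cons, List.getD, pvW_2 t, PySem.Chars.startswith, List.isPrefixOf]
      simp [pvWalk, pvR_1, pvD_1, PySem.Dict.get?_mk_cons, pv_get_nil, List.getD, PySem.Chars.startswith, List.isPrefixOf, Ne.symm h0]

lemma pvW_0 : ∀ l : List Char, pvWalk pvCT pvRT l 0 = (if PySem.Chars.startswith l ['i', 'n', 'f', 'o', '@'] then (0 : Int) else (if PySem.Chars.startswith l ['i', 'n', 'q', 'u', 'i', 'r', 'y', '@'] then (4 : Int) else (if PySem.Chars.startswith l ['i', 'n', 'q', 'u', 'i', 'r', 'i', 'e', 's', '@'] then (5 : Int) else (if PySem.Chars.startswith l ['c', 'o', 'n', 't', 'a', 'c', 't', '@'] then (1 : Int) else (if PySem.Chars.startswith l ['s', 'u', 'p', 'p', 'o', 'r', 't', '@'] then (2 : Int) else (if PySem.Chars.startswith l ['s', 'a', 'l', 'e', 's', '@'] then (3 : Int) else (if PySem.Chars.startswith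 l ['m', 'a', 'i', 'l', '@'] then (6 : Int) else (if PySem.Chars.startswith l ['o', 'f', 'f', 'i', 'c', 'e', '@'] then (7 : Int) else (if PySem.Chars.startswith l ['g', 'e', 'n', 'e', 'r', 'a', 'l', '@'] then (8 : Int) else 999))))))))) := by
  intro l
  cases l with
  | nil => simp [pvWalk, pvR_0, PySem.Chars.startswith, List.isPrefixOf]
  | cons c t =>
      by_cases h0 : c = 'i'
      · subst h0
        simp [pvWalk, pvR_0, pvD_0, PySem.Dict.get?_mk_cons, List.getD, pvW_1 t, PySem.Chars.startswith, List.isPrefixOf]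
      by_cases h1 : c = 'c'
      · subst h1
        simp [pvWalk, pvR_0, pvD_0, PySem.Dict.get?_mk_cons, List.getD, pvW_6 t, PySem.Chars.startswith, List.isPrefixOf]
      by_cases h2 : c = 's'
      · subst h2
        simp [pvWalk, pvR_0, pvD_0, PySem.Dict.get?_mk_cons, List.getD, pvW_14 t, PySem.Chars.startswith, List.isPrefixOf]
      by_cases h3 : c = 'm'
      · subst h3
        simp [pvWalk, pvR_0, pvD_0, PySem.Dict.get?_mk_cons, List.getD, pvW_37 t, PySem.Chars.startswith, List.isPrefixOf]
      by_cases h4 : c = 'o'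
      · subst h4
        simp [pvWalk, pvR_0, pvD_0, PySem.Dict.get?_mk_cons, List.getD, pvW_42 t, PySem.Chars.startswith, List.isPrefixOf]
      by_cases h5 : c = 'g'
      · subst h5
        simp [pvWalk, pvR_0, pvD_0, PySem.Dict.get?_mk_cons, List.getD, pvW_49 t, PySem.Chars.startswith, List.isPrefixOf]
      simp [pvWalk, pvR_0, pvD_0, PySem.Dict.get?_mk_cons, pv_get_nil, List.getD, PySem.Chars.startswith, List.isPrefixOf, Ne.symm h0, Ne.symm h1, Ne.symm h2, Ne.symm h3, Ne.symm h4, Ne.symm h5]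

lemma pv_core : ∀ l : List Char, pvLoop l pvPrefixes 0 = pvWalk pvCT pvRT l 0 := by
  intro l
  rw [pvW_0 l]
  by_cases g0 : PySem.Chars.startswith l ['i', 'n', 'f', 'o', '@'] = true
  · simp [pvLoop, pvPrefixes, g0]
  by_cases g1 : PySem.Chars.startswith l ['c', 'o', 'n', 't', 'a', 'c', 't', '@'] = true
  · simp [pvLoop, pvPrefixes, g1, pv_mutex l ['c', 'o', 'n', 't', 'a', 'c', 't', '@'] ['i', 'n', 'f', 'o', '@'] g1 (by decide) (by decide), pv_mutex l ['c', 'o', 'n', 't', 'a', 'c', 't', '@'] ['i', 'n', 'q', 'u', 'i', 'r', 'y', '@'] g1 (by decide) (by decide), pv_mutex l ['c', 'o', 'n', 't', 'a', 'c', 't', '@'] ['i', 'n', 'q', 'u', 'i', 'r', 'i', 'e', 's', '@'] g1 (by decide) (by decide)]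
  by_cases g2 : PySem.Chars.startswith l ['s', 'u', 'p', 'p', 'o', 'r', 't', '@'] = true
  · simp [pvLoop, pvPrefixes, g2, pv_mutex l ['s', 'u', 'p', 'p', 'o', 'r', 't', '@'] ['i', 'n', 'f', 'o', '@'] g2 (by decide) (by decide), pv_mutex l ['s', 'u', 'p', 'p', 'o', 'r', 't', '@'] ['c', 'o', 'n', 't', 'a', 'c', 't', '@'] g2 (by decide) (by decide), pv_mutex l ['s', 'u', 'p', 'p', 'o', 'r', 't', '@'] ['i', 'n', 'q', 'u', 'i', 'r', 'y', '@'] g2 (by decide) (by decide), pv_mutex l ['s', 'u', 'p', 'p', 'o', 'r', 't', '@'] ['i', 'n', 'q', 'u', 'i', 'r', 'i', 'e', 's', '@'] g2 (by decide) (by decide)]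
  by_cases g3 : PySem.Chars.startswith l ['s', 'a', 'l', 'e', 's', '@'] = true
  · simp [pvLoop, pvPrefixes, g3, pv_mutex l ['s', 'a', 'l', 'e', 's', '@'] ['i', 'n', 'f', 'o', '@'] g3 (by decide) (by decide), pv_mutex l ['s', 'a', 'l', 'e', 's', '@'] ['c', 'o', 'n', 't', 'a', 'c', 't', '@'] g3 (by decide) (by decide), pv_mutex l ['s', 'a', 'l', 'e', 's', '@'] ['s', 'u', 'p', 'p', 'o', 'r', 't', '@'] g3 (by decide) (by decide), pv_mutex l ['s', 'a', 'l', 'e', 's', '@'] ['i', 'n', 'q', 'u', 'i', 'r', 'y', '@'] g3 (by decide) (by decide), pv_mutex l ['s', 'a', 'l', 'e', 's', '@'] ['i', 'n', 'q', 'u', 'i', 'r', 'i', 'e', 's', '@'] g3 (by decide) (by decide)]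
  by_cases g4 : PySem.Chars.startswith l ['i', 'n', 'q', 'u', 'i', 'r', 'y', '@'] = true
  · simp [pvLoop, pvPrefixes, g4, pv_mutex l ['i', 'n', 'q', 'u', 'i', 'r', 'y', '@'] ['i', 'n', 'f', 'o', '@'] g4 (by decide) (by decide), pv_mutex l ['i', 'n', 'q', 'u', 'i', 'r', 'y', '@'] ['c', 'o', 'n', 't', 'a', 'c', 't', '@'] g4 (by decide) (by decide), pv_mutex l ['i', 'n', 'q', 'u', 'i', 'r', 'y', '@'] ['s', 'u', 'p', 'p', 'o', 'r', 't', '@'] g4 (by decide) (by decide), pv_mutex l ['i', 'n', 'q', 'u', 'i', 'r', 'y', '@'] ['s', 'a', 'l', 'e', 's', '@'] g4 (by decide) (by decide)]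
  by_cases g5 : PySem.Chars.startswith l ['i', 'n', 'q', 'u', 'i', 'r', 'i', 'e', 's', '@'] = true
  · simp [pvLoop, pvPrefixes, g5, pv_mutex l ['i', 'n', 'q', 'u', 'i', 'r', 'i', 'e', 's', '@'] ['i', 'n', 'f', 'o', '@'] g5 (by decide) (by decide), pv_mutex l ['i', 'n', 'q', 'u', 'i', 'r', 'i', 'e', 's', '@'] ['c', 'o', 'n', 't', 'a', 'c', 't', '@'] g5 (by decide) (by decide), pv_mutex l ['i', 'n', 'q', 'u', 'i', 'r', 'i', 'e', 's', '@'] ['s', 'u', 'p', 'p', 'o', 'r', 't', '@'] g5 (by decide) (by decide), pv_mutex l ['i', 'n', 'q', 'u', 'i', 'r', 'i', 'e', 's', '@'] ['s', 'a', 'l', 'e', 's', '@'] g5 (by decide) (by decide), pv_mutex l ['i', 'n', 'q', 'u', 'i', 'r', 'i', 'e', 's', '@'] ['i', 'n', 'q', 'u', 'i', 'r', 'y', '@'] g5 (by decide) (by decide)]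
  by_cases g6 : PySem.Chars.startswith l ['m', 'a', 'i', 'l', '@'] = true
  · simp [pvLoop, pvPrefixes, g6, pv_mutex l ['m', 'a', 'i', 'l', '@'] ['i', 'n', 'f', 'o', '@'] g6 (by decide) (by decide), pv_mutex l ['m', 'a', 'i', 'l', '@'] ['c', 'o', 'n', 't', 'a', 'c', 't', '@'] g6 (by decide) (by decide), pv_mutex l ['m', 'a', 'i', 'l', '@'] ['s', 'u', 'p', 'p', 'o', 'r', 't', '@'] g6 (by decide) (by decide), pv_mutex l ['m', 'a', 'i', 'l', '@'] ['s', 'a', 'l', 'e', 's', '@'] g6 (by decide) (by decide), pv_mutex l ['m', 'a', 'i', 'l', '@'] ['i', 'n', 'q', 'u', 'i', 'r', 'y', '@'] g6 (by decide) (by decide), pv_mutex l ['m', 'a', 'i', 'l', '@'] ['i', 'n', 'q', 'u', 'i', 'r', 'i', 'e', 's', '@'] g6 (by decide) (by decide)]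
  by_cases g7 : PySem.Chars.startswith l ['o', 'f', 'f', 'i', 'c', 'e', '@'] = true
  · simp [pvLoop, pvPrefixes, g7, pv_mutex l ['o', 'f', 'f', 'i', 'c', 'e', '@'] ['i', 'n', 'f', 'o', '@'] g7 (by decide) (by decide), pv_mutex l ['o', 'f', 'f', 'i', 'c', 'e', '@'] ['c', 'o', 'n', 't', 'a', 'c', 't', '@'] g7 (by decide) (by decide), pv_mutex l ['o', 'f', 'f', 'i', 'c', 'e', '@'] ['s', 'u', 'p', 'p', 'o', 'r', 't', '@'] g7 (by decide) (by decide), pv_mutex l ['o', 'f', 'f', 'i', 'c', 'e', '@'] ['s', 'a', 'l', 'e', 's', '@'] g7 (by decide) (by decide), pv_mutex l ['o', 'f', 'f', 'i', 'c', 'e', '@'] ['i', 'n', 'q', 'u', 'i', 'r', 'y', '@'] g7 (by decide) (by decide), pv_mutex l ['o', 'f', 'f', 'i', 'c', 'e', '@'] ['i', 'n', 'q', 'u', 'i', 'r', 'i', 'e', 's', '@'] g7 (by decide) (by decide), pv_mutex l ['o', 'f', 'f', 'i', 'c', 'e', '@'] ['m', 'a', 'i', 'l', '@'] g7 (by decide)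 (by decide)]
  by_cases g8 : PySem.Chars.startswith l ['g', 'e', 'n', 'e', 'r', 'a', 'l', '@'] = true
  · simp [pvLoop, pvPrefixes, g8, pv_mutex l ['g', 'e', 'n', 'e', 'r', 'a', 'l', '@'] ['i', 'n', 'f', 'o', '@'] g8 (by decide) (by decide), pv_mutex l ['g', 'e', 'n', 'e', 'r', 'a', 'l', '@'] ['c', 'o', 'n', 't', 'a', 'c', 't', '@'] g8 (by decide) (by decide), pv_mutex l ['g', 'e', 'n', 'e', 'r', 'a', 'l', '@'] ['s', 'u', 'p', 'p', 'o', 'r', 't', '@'] g8 (by decide) (by decide), pv_mutex l ['g', 'e', 'n', 'e', 'r', 'a', 'l', '@'] ['s', 'a', 'l', 'e', 's', '@'] g8 (by decide) (by decide), pv_mutex l ['g', 'e', 'n', 'e', 'r', 'a', 'l', '@'] ['i', 'n', 'q', 'u', 'i', 'r', 'y', '@'] g8 (by decide) (by decide), pv_mutex l ['g', 'e', 'n', 'e', 'r', 'a', 'l', '@'] ['i', 'n', 'q', 'u', 'i', 'r', 'i', 'e', 's', '@'] g8 (by decide) (by decide), pv_mutex l ['g', 'e', 'n', 'e', 'r',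 'a', 'l', '@'] ['m', 'a', 'i', 'l', '@'] g8 (by decide) (by decide), pv_mutex l ['g', 'e', 'n', 'e', 'r', 'a', 'l', '@'] ['o', 'f', 'f', 'i', 'c', 'e', '@'] g8 (by decide) (by decide)]
  simp [pvLoop, pvPrefixes, g0, g1, g2, g3, g4, g5, g6, g7, g8]

-- ===== VERDICT (by name: the statement is the Claim_ definition above) =====
theorem get_email_priority_spec : Claim_equal_get_email_priority := by
  intro email _
  unfold Spec_get_email_priority get_email_priority get_email_priority_alt
  rw [pvChild_eq, pvRank_eq]
  exact pv_core (PySem.Chars.lower email.toList)
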